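-- pv_equiv track=rewrite | github.com/AdityaKotwal100/logical-clocks | main.py | sort_json_by_type_and_id
-- ===== SOURCE A (Python) =====
-- def sort_json_by_type_and_id(json_data):
--     """Sorts JSON data by type and id, with customer types coming first within each id group.
--
--     Args:
--       json_data: A list of JSON objects.
--
--     Returns:
--       A list of JSON objects sorted by type and id, with customer types coming first
--       within each id group.
--     """
--
--     # Create a dictionary to store the JSON objects grouped by id.
--     id_to_json_objects = {}
--     for json_object in json_data:
--         _id = json_object["id"]
--         if _id not in id_to_json_objects:
--             id_to_json_objects[_id] = []
--         id_to_json_objects[_id].append(json_object)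
--
--     # Sort the JSON objects in each id group by type, with customer types coming first.
--     for json_objects in id_to_json_objects.values():
--         json_objects.sort(key=lambda json_object: json_object["type"], reverse=True)
--
--     # Flatten the dictionary of id groups into a single list of JSON objects.
--     sorted_json_data = []
--     for json_objects in id_to_json_objects.values():
--         sorted_json_data.extend(json_objects)
--
--     return sorted_json_data
-- ===== SOURCE B (Python) =====
-- def sort_json_by_type_and_id(json_data):
--     """Partition-refinement: repeatedly peel off the group of the first remaining
--     id, sort it by type descending, and append; no dict of lists is built."""
--     result = []
--     remaining = list(json_data)
--     while remaining:
--         i = remaining[0]["id"]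
--         group = [o for o in remaining if o["id"] == i]
--         remaining = [o for o in remaining if o["id"] != i]
--         result += sorted(group, key=lambda o: o["type"], reverse=True)
--     return result
-- ===== Notes on version B (the rewrite author's own statement) =====
-- stated objective: alternative
-- what changed: Replaces A's dict-of-lists grouping (build dict id->group, sort each group, flatten the dict values) by partition refinement: a loop that repeatedly peels off the group of the first remaining id with two filters, sorts it by type descending, and appends it to the result; no dictionary is built.
import Mathlib
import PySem

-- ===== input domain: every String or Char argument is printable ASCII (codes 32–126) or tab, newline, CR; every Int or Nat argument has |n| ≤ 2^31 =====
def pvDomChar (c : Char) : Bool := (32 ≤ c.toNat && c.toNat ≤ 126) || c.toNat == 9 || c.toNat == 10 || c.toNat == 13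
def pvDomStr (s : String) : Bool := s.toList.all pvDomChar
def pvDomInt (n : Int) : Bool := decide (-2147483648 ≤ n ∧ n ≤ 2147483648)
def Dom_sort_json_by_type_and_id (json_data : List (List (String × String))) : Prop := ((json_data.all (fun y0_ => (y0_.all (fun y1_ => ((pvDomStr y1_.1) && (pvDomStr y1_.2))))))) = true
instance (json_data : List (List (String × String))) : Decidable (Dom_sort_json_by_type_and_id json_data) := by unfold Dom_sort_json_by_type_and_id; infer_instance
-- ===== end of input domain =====

-- B replaces A's dict-of-lists grouping by partition refinement: repeatedly peel off the
-- group of the first remaining id, sort it by type descending, append (objective: alternative).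

-- Python dict lookup obj[k] on an object represented as an association list; exact under
-- Pre_ (keys Nodup, k present); the missing-key case (Python KeyError) is excluded by Pre_.
def pvGetKey (o : List (String × String)) (k : String) : String :=
  (((o.find? (fun p => p.1 == k)).map Prod.snd).getD "")

-- ===== PORT A =====
def sort_json_by_type_and_id (json_data : List (List (String × String))) : List (List (String × String)) :=
  let d := json_data.foldl (fun d obj =>
      let i := pvGetKey obj "id"
      let d1 := if d.contains i then d else d.insert i ([] : List (List (String × String)))
      d1.modify i [] (fun g => g ++ [obj])) PySem.Dict.empty
  let sortedGroups := d.values.map (fun g => PySem.List.sorted g (fun o => pvGetKey o "type") true)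
  sortedGroups.foldl (fun acc g => acc ++ g) []

-- ===== PORT B =====
def sort_json_by_type_and_id_alt : List (List (String × String)) → List (List (String × String))
  | [] => []
  | x :: rest =>
      PySem.List.sorted ((x :: rest).filter (fun o => pvGetKey o "id" == pvGetKey x "id"))
          (fun o => pvGetKey o "type") true
        ++ sort_json_by_type_and_id_alt
            ((x :: rest).filter (fun o => !(pvGetKey o "id" == pvGetKey x "id")))
termination_by l => l.length
decreasing_by
  simp only [List.filter_cons, beq_self_eq_true, Bool.not_true, Bool.false_eq_true, if_false]
  exact Nat.lt_succ_of_le (List.length_filter_le _ _)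

-- ===== PRECONDITION & SPEC =====
-- Pre_ excludes objects missing the "id" or "type" key (Python A raises KeyError there, as
-- does B) and objects with duplicate keys, on which an association list does not represent a
-- Python dict faithfully (the dict literal silently keeps only the last value of the key).
def Pre_sort_json_by_type_and_id (json_data : List (List (String × String))) : Prop :=
  ∀ o ∈ json_data, (o.map Prod.fst).Nodup ∧ "id" ∈ o.map Prod.fst ∧ "type" ∈ o.map Prod.fst
instance (json_data : List (List (String × String))) : Decidable (Pre_sort_json_by_type_and_id json_data) := by
  unfold Pre_sort_json_by_type_and_id; infer_instance

def pvWitness_sort_json_by_type_and_id : (List (List (String × String))) :=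
  [[("id", "1"), ("type", "b")], [("id", "2"), ("type", "a")], [("id", "1"), ("type", "c")]]

def Spec_sort_json_by_type_and_id (json_data : List (List (String × String))) (out : List (List (String × String))) : Prop := out = sort_json_by_type_and_id_alt json_data
instance (json_data : List (List (String × String))) (out : List (List (String × String))) : Decidable (Spec_sort_json_by_type_and_id json_data out) := by unfold Spec_sort_json_by_type_and_id; infer_instance

-- ===== CLAIM (what is proved, stated in full; the proofs are below) =====
def Claim_equal_sort_json_by_type_and_id : Prop := ∀ (json_data : List (List (String × String))), Dom_sort_json_by_type_and_id json_data → Pre_sort_json_by_type_and_id json_data → Spec_sort_json_by_type_and_id json_data (sort_json_by_type_and_id json_data)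

-- ===== LEMMAS AND PROOFS =====

-- One fold step of A ("if new id then start []; then append") equals a plain Dict.modify step.
theorem pvStep_eq (d : PySem.Dict String (List (List (String × String)))) (i : String)
    (x : List (String × String)) :
    ((if d.contains i then d else d.insert i ([] : List (List (String × String)))).modify i []
        (fun g => g ++ [x])) = d.modify i [] (fun g => g ++ [x]) := by
  by_cases h : d.contains i
  · simp [h]
  · simp only [if_neg h, PySem.Dict.modify]
    rw [PySem.Dict.getD_insert_self, PySem.Dict.insert_insert_self,
      PySem.Dict.getD_of_not_contains _ _ (by simp [h])]

theorem pvFold_eq (l : List (List (String × String)))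
    (d : PySem.Dict String (List (List (String × String)))) :
    l.foldl (fun d obj =>
        let i := pvGetKey obj "id"
        let d1 := if d.contains i then d else d.insert i ([] : List (List (String × String)))
        d1.modify i [] (fun g => g ++ [obj])) d
      = l.foldl (fun d obj => d.modify (pvGetKey obj "id") [] (fun g => g ++ [obj])) d := by
  simp only [pvStep_eq]

-- filtering commutes with Python's first-occurrence dedup
theorem pvFilter_ofList (p : String → Bool) (xs : List String) :
    (PySem.Set.ofList xs).filter p = PySem.Set.ofList (xs.filter p) := by
  induction xs with
  | nil => rfl
  | cons x xs ih =>
    rw [PySem.Set.ofList_cons, PySem.Set.discard, List.filter_cons]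
    by_cases hp : p x = true
    · rw [hp]
      simp only [if_true, PySem.Set.ofList_cons, PySem.Set.discard, List.filter_cons, hp,
        ← ih, List.filter_filter, List.filter_filter]
      simp [Bool.and_comm]
    · simp only [hp, Bool.false_eq_true, if_false, List.filter_filter,
        List.filter_cons_of_neg hp, ← ih]
      apply List.filter_congr
      intro a _
      by_cases h : p a = true
      · have hax : (a == x) = false := by
          simp only [beq_eq_false_iff_ne]; rintro rfl; exact hp h
        simp [h, hax]
      · simp only [Bool.not_eq_true] at h; simp [h]

-- each entry of A's dict is the sublist of objects with that id, in input order
theorem pvGroups (l : List (List (String × String))) (c : String) :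
    (l.foldl (fun d obj => d.modify (pvGetKey obj "id") [] (fun g => g ++ [obj]))
        PySem.Dict.empty).getD c []
      = l.filter (fun o => pvGetKey o "id" == c) := by
  rw [show l.foldl (fun d obj => d.modify (pvGetKey obj "id") [] (fun g => g ++ [obj]))
        PySem.Dict.empty
      = (l.map (fun x => (pvGetKey x "id", x))).foldl
          (fun d p => d.modify p.1 [] (fun g => g ++ [p.2])) PySem.Dict.empty from
    (List.foldl_map (f := fun x => (pvGetKey x "id", x))
      (g := fun d p => d.modify p.1 [] (fun g => g ++ [p.2]))
      (l := l) (init := PySem.Dict.empty)).symm]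
  rw [PySem.Dict.getD_foldl_modify_append]
  simp [List.filter_map, Function.comp_def]

-- A's dict keys are the distinct ids in first-appearance order
theorem pvKeys (l : List (List (String × String))) :
    (l.foldl (fun d obj => d.modify (pvGetKey obj "id") [] (fun g => g ++ [obj]))
        PySem.Dict.empty).keys
      = PySem.Set.ofList (l.map (fun o => pvGetKey o "id")) := by
  rw [PySem.Dict.keys_foldl_modify_key l (fun o => pvGetKey o "id") []
      (fun _ x => (fun g => g ++ [x])), PySem.Dict.keys_empty, PySem.Set.ofList_eq_foldl]
  rfl

theorem pvNodupKeys (l : List (List (String × String))) :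
    (l.foldl (fun d obj => d.modify (pvGetKey obj "id") [] (fun g => g ++ [obj]))
        PySem.Dict.empty).keys.Nodup :=
  PySem.Dict.nodup_keys_foldl_modify_key l (fun o => pvGetKey o "id") []
    (fun _ x => (fun g => g ++ [x])) PySem.Dict.empty
    (by rw [PySem.Dict.keys_empty]; exact List.nodup_nil)

-- characterisation of A: groups of distinct ids in first-appearance order, each sorted, flattened
theorem pvA_char (l : List (List (String × String))) :
    sort_json_by_type_and_id l
      = ((PySem.Set.ofList (l.map (fun o => pvGetKey o "id"))).map
          (fun k => PySem.List.sorted (l.filter (fun o => pvGetKey o "id" == k))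
            (fun o => pvGetKey o "type") true)).flatten := by
  unfold sort_json_by_type_and_id
  simp only []
  rw [pvFold_eq]
  rw [PySem.Dict.values_eq_map_keys _ (pvNodupKeys l) [], List.map_map,
    PySem.List.foldl_append_eq_flatMap (fun g => g) _ [], List.nil_append, pvKeys,
    List.flatMap_id', ← List.map_map, List.map_map]
  congr 1
  apply List.map_congr_left
  intro k _
  simp only [Function.comp_apply, pvGroups]

-- B computes the same flattening, by strong induction on the list length
theorem pvB_char (n : Nat) : ∀ (l : List (List (String × String))), l.length ≤ n →
    sort_json_by_type_and_id_alt l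
      = ((PySem.Set.ofList (l.map (fun o => pvGetKey o "id"))).map
          (fun k => PySem.List.sorted (l.filter (fun o => pvGetKey o "id" == k))
            (fun o => pvGetKey o "type") true)).flatten := by
  induction n with
  | zero =>
    intro l hl
    rw [List.length_eq_zero_iff.mp (Nat.le_zero.mp hl), sort_json_by_type_and_id_alt]
    rfl
  | succ n ih =>
    intro l hl
    match l with
    | [] => rw [sort_json_by_type_and_id_alt]; rfl
    | x :: r =>
      rw [sort_json_by_type_and_id_alt]
      have hhead : (x :: r).filter (fun o => !(pvGetKey o "id" == pvGetKey x "id"))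
          = r.filter (fun o => !(pvGetKey o "id" == pvGetKey x "id")) := by
        simp
      have hids : PySem.Set.ofList ((x :: r).map (fun o => pvGetKey o "id"))
          = pvGetKey x "id" ::
            PySem.Set.ofList ((r.filter (fun o => !(pvGetKey o "id" == pvGetKey x "id"))).map
              (fun o => pvGetKey o "id")) := by
        rw [List.map_cons, PySem.Set.ofList_cons, PySem.Set.discard, pvFilter_ofList,
          List.filter_map]
        rfl
      rw [hids, List.map_cons, List.flatten_cons, hhead]
      congr 1
      rw [ih (r.filter (fun o => !(pvGetKey o "id" == pvGetKey x "id")))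
        (le_trans (List.length_filter_le _ _) (Nat.le_of_succ_le_succ hl))]
      congr 1
      apply List.map_congr_left
      intro k hk
      have hknd : k ∈ (r.filter (fun o => !(pvGetKey o "id" == pvGetKey x "id"))).map
          (fun o => pvGetKey o "id") := (PySem.Set.mem_ofList _ _).mp hk
      have hkne : k ≠ pvGetKey x "id" := by
        obtain ⟨o, ho, rfl⟩ := List.mem_map.mp hknd
        simpa using List.of_mem_filter ho
      congr 1
      rw [List.filter_cons]
      simp only [show (pvGetKey x "id" == k) = false from beq_eq_false_iff_ne.mpr (fun h => hkne h.symm),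
        Bool.false_eq_true, if_false, List.filter_filter]
      apply List.filter_congr
      intro o _
      by_cases h : (pvGetKey o "id" == k) = true
      · have hoi : (pvGetKey o "id" == pvGetKey x "id") = false := by
          rw [beq_eq_false_iff_ne, eq_of_beq h]; exact hkne
        simp [h, hoi]
      · simp [h]

-- ===== VERDICT (by name: the statement is the Claim_ definition above) =====
theorem sort_json_by_type_and_id_spec : Claim_equal_sort_json_by_type_and_id := by
  intro l _ _
  unfold Spec_sort_json_by_type_and_id
  rw [pvA_char, pvB_char l.length l le_rfl]
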